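-- pv_equiv track=rewrite | github.com/roslaniecdominik/PlotApp | components/dataConfiguration.py | prn_filtering
-- ===== SOURCE A (Python) =====
-- def prn_filtering(filepath):
--     found_err = False
--     found_res = False
--     found_avs = False
--
--     for file in filepath:
--         if "Err" in file:
--             found_err = True
--         if "Res" in file:
--             found_res = True
--         if "AvS" in file:
--             found_avs = True
--         if found_res and found_avs and found_err:
--             break
--
--     if not found_err and not found_res and not found_avs:
--         return True
--     else:
--         return found_res and found_avs and found_err
-- ===== SOURCE B (Python) =====
-- def prn_filtering(filepath):
--     err = any("Err" in f for f in filepath)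
--     res = any("Res" in f for f in filepath)
--     avs = any("AvS" in f for f in filepath)
--     return (err and res and avs) or not (err or res or avs)
-- ===== Notes on version B (the rewrite author's own statement) =====
-- stated objective: simpler
-- what changed: Replaces the fused flag-maintaining loop with early break by three independent any() scans combined by the closed-form boolean (all three present) or (none present).
import Mathlib
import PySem

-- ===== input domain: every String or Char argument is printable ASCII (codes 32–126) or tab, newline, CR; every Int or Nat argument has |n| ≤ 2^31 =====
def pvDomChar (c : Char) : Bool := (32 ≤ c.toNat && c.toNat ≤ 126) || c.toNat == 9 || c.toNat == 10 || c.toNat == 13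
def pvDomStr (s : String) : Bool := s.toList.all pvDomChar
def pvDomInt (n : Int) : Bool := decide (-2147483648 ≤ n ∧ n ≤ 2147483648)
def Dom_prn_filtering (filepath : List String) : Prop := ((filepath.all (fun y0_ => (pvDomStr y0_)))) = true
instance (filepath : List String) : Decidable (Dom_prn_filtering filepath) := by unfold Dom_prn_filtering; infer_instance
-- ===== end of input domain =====

-- B replaces A's fused flag loop with early break by three independent any-scans
-- combined by a closed-form boolean; same return value, similar cost.
-- ===== PORT A =====
def prnLoopA : List String → Bool → Bool → Bool → Bool × Bool × Bool
  | [], e, r, a => (e, r, a)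
  | f :: rest, e, r, a =>
    let e := if PySem.Str.isIn "Err" f then true else e
    let r := if PySem.Str.isIn "Res" f then true else r
    let a := if PySem.Str.isIn "AvS" f then true else a
    if r && a && e then (e, r, a) else prnLoopA rest e r a

def prn_filtering (filepath : List String) : Bool :=
  let (e, r, a) := prnLoopA filepath false false false
  if !e && !r && !a then true else r && a && e

-- ===== PORT B =====
def prn_filtering_alt (filepath : List String) : Bool :=
  let err := filepath.any (fun f => PySem.Str.isIn "Err" f)
  let res := filepath.any (fun f => PySem.Str.isIn "Res" f)
  let avs := filepath.any (fun f => PySem.Str.isIn "AvS" f)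
  (err && res && avs) || !(err || res || avs)

-- ===== PRECONDITION & SPEC =====
def Spec_prn_filtering (filepath : List String) (out : Bool) : Prop := out = prn_filtering_alt filepath
instance (filepath : List String) (out : Bool) : Decidable (Spec_prn_filtering filepath out) := by unfold Spec_prn_filtering; infer_instance

-- ===== CLAIM (what is proved, stated in full; the proofs are below) =====
def Claim_equal_prn_filtering : Prop := ∀ (filepath : List String), Dom_prn_filtering filepath → Spec_prn_filtering filepath (prn_filtering filepath)

-- ===== LEMMAS AND PROOFS =====

-- ===== VERDICT (by name: the statement is the Claim_ definition above) =====
-- loop invariant: the fused loop computes the three any-scans, break notwithstanding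
theorem prnLoopA_eq (fp : List String) (e r a : Bool) :
    prnLoopA fp e r a =
      (e || fp.any (fun f => PySem.Str.isIn "Err" f),
       r || fp.any (fun f => PySem.Str.isIn "Res" f),
       a || fp.any (fun f => PySem.Str.isIn "AvS" f)) := by
  induction fp generalizing e r a with
  | nil => simp [prnLoopA]
  | cons f rest ih =>
    simp only [prnLoopA, List.any_cons]
    by_cases h1 : PySem.Str.isIn "Err" f <;>
      by_cases h2 : PySem.Str.isIn "Res" f <;>
        by_cases h3 : PySem.Str.isIn "AvS" f <;>
          simp only [h1, h2, h3, if_true, if_false, ite_true, ite_false] <;>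
            cases e <;> cases r <;> cases a <;> simp [ih]

theorem prn_filtering_spec : Claim_equal_prn_filtering := by
  intro fp _
  unfold Spec_prn_filtering prn_filtering prn_filtering_alt
  rw [prnLoopA_eq]
  simp only [Bool.false_or]
  cases fp.any (fun f => PySem.Str.isIn "Err" f) <;>
    cases fp.any (fun f => PySem.Str.isIn "Res" f) <;>
      cases fp.any (fun f => PySem.Str.isIn "AvS" f) <;> rfl
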